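-- pv_equiv track=rewrite | github.com/rubelw/OSSS | src/OSSS/ai/agents/query_data/handlers/bus_routes_handler.py | _select_bus_routes_fields
-- ===== SOURCE A (Python) =====
-- from typing import Any, Dict, List, Sequence
--
-- def _select_bus_routes_fields(
--     rows: Sequence[Dict[str, Any]],
-- ) -> List[str]:
--     if not rows:
--         return []
--
--     preferred_order = [
--         "id",
--         "route_code",
--         "name",
--         "description",
--         "direction",       # AM, PM, etc.
--         "school_year",
--         "school_id",
--         "school_name",
--         "driver_id",
--         "driver_name",
--         "bus_number",
--         "capacity",
--         "is_active",
--         "effective_start_date",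
--         "effective_end_date",
--         "created_at",
--         "updated_at",
--     ]
--
--     all_keys: List[str] = []
--     for r in rows:
--         for k in r.keys():
--             if k not in all_keys:
--                 all_keys.append(k)
--
--     ordered = [k for k in preferred_order if k in all_keys]
--     ordered.extend(k for k in all_keys if k not in ordered)
--     return ordered
-- ===== SOURCE B (Python) =====
-- from typing import Any, Dict, List, Sequence
--
-- def _select_bus_routes_fields(
--     rows: Sequence[Dict[str, Any]],
-- ) -> List[str]:
--     preferred_order = [
--         "id",
--         "route_code",
--         "name",
--         "description",
--         "direction",
--         "school_year",
--         "school_id",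
--         "school_name",
--         "driver_id",
--         "driver_name",
--         "bus_number",
--         "capacity",
--         "is_active",
--         "effective_start_date",
--         "effective_end_date",
--         "created_at",
--         "updated_at",
--     ]
--     n = len(preferred_order)
--     rank = {k: i for i, k in enumerate(preferred_order)}
--     distinct = list(dict.fromkeys(k for r in rows for k in r.keys()))
--     pos = {k: i for i, k in enumerate(distinct)}
--     # preferred keys sort to their preferred rank; every other key sorts after
--     # them, ordered by its first-seen position
--     return sorted(distinct, key=lambda k: rank.get(k, n + pos[k]))
-- ===== Notes on version B (the rewrite author's own statement) =====
-- stated objective: faster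
-- what changed: A's two membership-filtered scans (grow all_keys with 'k not in all_keys', then filter preferred_order and re-filter with 'k not in ordered') are replaced by one dict.fromkeys dedup plus a single stable sort keyed by precomputed rank / first-seen-position dicts.
import Mathlib
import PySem

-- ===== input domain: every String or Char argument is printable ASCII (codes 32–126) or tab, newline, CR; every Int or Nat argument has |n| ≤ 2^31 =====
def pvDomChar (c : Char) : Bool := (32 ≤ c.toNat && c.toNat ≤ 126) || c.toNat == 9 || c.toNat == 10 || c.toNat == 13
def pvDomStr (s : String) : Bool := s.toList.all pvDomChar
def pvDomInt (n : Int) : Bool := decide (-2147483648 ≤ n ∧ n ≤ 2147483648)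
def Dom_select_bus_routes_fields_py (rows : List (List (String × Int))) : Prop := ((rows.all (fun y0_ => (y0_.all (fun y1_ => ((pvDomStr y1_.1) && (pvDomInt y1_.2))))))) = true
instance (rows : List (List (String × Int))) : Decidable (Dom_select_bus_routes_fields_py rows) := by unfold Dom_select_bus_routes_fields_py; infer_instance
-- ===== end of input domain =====

-- B replaces A's two membership-filtered list scans by a dict.fromkeys dedup plus
-- one stable sort under a precomputed rank / first-seen-position key; the timing
-- run measured B faster on the generated large inputs.

-- the module-level preferred_order literal, shared by both ports
def preferredOrder : List String :=
  ["id", "route_code", "name", "description", "direction", "school_year",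
   "school_id", "school_name", "driver_id", "driver_name", "bus_number",
   "capacity", "is_active", "effective_start_date", "effective_end_date",
   "created_at", "updated_at"]

-- ===== PORT A =====
-- r.keys() of a Python dict passed as an assoc list is its key column (exact:
-- a real dict's keys are unique, so the column is exactly list(r.keys()))
def select_bus_routes_fields_py (rows : List (List (String × Int))) : List String :=
  if rows = [] then []
  else
    let all_keys : List String :=
      rows.foldl (fun acc r =>
        (r.map (·.1)).foldl (fun ks k => if ks.contains k then ks else ks ++ [k]) acc) []
    let ordered : List String := preferredOrder.filter (fun k => all_keys.contains k)
    -- 'ordered.extend(k for k in all_keys if k not in ordered)': the generator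
    -- tests membership against the growing ordered list
    all_keys.foldl (fun o k => if o.contains k then o else o ++ [k]) ordered

-- ===== PORT B =====
def select_bus_routes_fields_py_alt (rows : List (List (String × Int))) : List String :=
  let n : Int := (preferredOrder.length : Int)
  -- {k: i for i, k in enumerate(preferred_order)}
  let rank : PySem.Dict String Int :=
    (PySem.List.enumerate preferredOrder 0).foldl (fun d p => d.insert p.2 p.1) PySem.Dict.empty
  -- list(dict.fromkeys(k for r in rows for k in r.keys()))
  let distinct : List String := PySem.List.dedup (rows.flatMap (fun r => r.map (·.1)))
  -- {k: i for i, k in enumerate(distinct)}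
  let pos : PySem.Dict String Int :=
    (PySem.List.enumerate distinct 0).foldl (fun d p => d.insert p.2 p.1) PySem.Dict.empty
  -- sorted(distinct, key=lambda k: rank.get(k, n + pos[k]))  (pos[k] never misses: k ∈ distinct)
  PySem.List.sorted distinct (fun k => rank.getD k (n + pos.getD k 0)) false

-- ===== PRECONDITION & SPEC =====
def Spec_select_bus_routes_fields_py (rows : List (List (String × Int))) (out : List String) : Prop := out = select_bus_routes_fields_py_alt rows
instance (rows : List (List (String × Int))) (out : List String) : Decidable (Spec_select_bus_routes_fields_py rows out) := by unfold Spec_select_bus_routes_fields_py; infer_instance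

-- ===== CLAIM (what is proved, stated in full; the proofs are below) =====
def Claim_equal_select_bus_routes_fields_py : Prop := ∀ (rows : List (List (String × Int))), Dom_select_bus_routes_fields_py rows → Spec_select_bus_routes_fields_py rows (select_bus_routes_fields_py rows)

-- ===== LEMMAS AND PROOFS =====

theorem pref_nodup : preferredOrder.Nodup := by decide

-- abbreviations for the proof
def pvL (rows : List (List (String × Int))) : List String := rows.flatMap (fun r => r.map (·.1))
def pvD (rows : List (List (String × Int))) : List String := PySem.Set.ofList (pvL rows)
def pvOrdered (rows : List (List (String × Int))) : List String :=
  preferredOrder.filter (fun k => (pvD rows).contains k)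
def pvIdxDict (xs : List String) : PySem.Dict String Int :=
  (PySem.List.enumerate xs 0).foldl (fun d p => d.insert p.2 p.1) PySem.Dict.empty
def pvK (rows : List (List (String × Int))) : String → Int := fun k =>
  (pvIdxDict preferredOrder).getD k ((preferredOrder.length : Int) + (pvIdxDict (pvD rows)).getD k 0)

theorem idxDict_keys (xs : List String) : (pvIdxDict xs).keys = PySem.Set.ofList xs := by
  unfold pvIdxDict
  rw [PySem.Dict.keys_foldl_insert_key]
  simp [PySem.List.map_snd_enumerate, PySem.Set.update_nil_left]

-- the index dict {k: i for i, k in enumerate(xs)} looks up a key's position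
theorem idxDict_getD (xs : List String) (h : xs.Nodup) (k : String) (dflt : Int) :
    (pvIdxDict xs).getD k dflt = if k ∈ xs then (xs.idxOf k : Int) else dflt := by
  have hkeys := idxDict_keys xs
  have hknd : (pvIdxDict xs).keys.Nodup := by
    rw [hkeys]; exact PySem.Set.nodup_ofList xs
  by_cases hk : k ∈ xs
  · have hi : xs.idxOf k < xs.length := List.idxOf_lt_length_of_mem hk
    have hitem : (pvIdxDict xs).items = (PySem.List.enumerate xs 0).map (fun p => (p.2, p.1)) := by
      have := PySem.Dict.items_foldl_insert_fresh (l := PySem.List.enumerate xs 0)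
        (k := fun p => p.2) (v := fun p => p.1) (d := PySem.Dict.empty)
        (by intro a _; simp [PySem.Dict.contains_empty])
        (by simpa [PySem.List.map_snd_enumerate] using h)
      simpa [pvIdxDict] using this
    have hmemi : ((xs.idxOf k : Int), k) ∈ PySem.List.enumerate xs 0 := by
      rw [PySem.List.mem_enumerate_iff]
      exact ⟨xs.idxOf k, hi, by simp [List.getElem_idxOf]⟩
    have hmem : (k, (xs.idxOf k : Int)) ∈ (pvIdxDict xs).items := by
      rw [hitem]; exact List.mem_map.mpr ⟨_, hmemi, rfl⟩
    rw [PySem.Dict.getD_of_mem_items _ hmem hknd]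
    simp [hk]
  · rw [PySem.Dict.getD_of_not_contains]
    · simp [hk]
    · have hnk : k ∉ (pvIdxDict xs).keys := by
        rw [hkeys]; simpa [PySem.Set.mem_ofList] using hk
      rw [Bool.eq_false_iff]
      intro hc
      exact hnk ((PySem.Dict.contains_iff_mem_keys _ _).mp hc)

-- the nested key-collecting loop of A is a single loop over the flattened keys
theorem foldl_flat (rows : List (List (String × Int))) (init : List String) :
    rows.foldl (fun acc r =>
        (r.map (·.1)).foldl (fun ks k => if ks.contains k then ks else ks ++ [k]) acc) init
      = (pvL rows).foldl (fun ks k => if ks.contains k then ks else ks ++ [k]) init := by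
  induction rows generalizing init with
  | nil => rfl
  | cons r t ih =>
    simp only [List.foldl_cons, pvL, List.flatMap_cons, List.foldl_append] at ih ⊢
    exact ih _

theorem growing_foldl_eq_update (s xs : List String) :
    xs.foldl (fun o k => if o.contains k then o else o ++ [k]) s = PySem.Set.update s xs := rfl

-- A, on nonempty rows, is 'preferred ∩ keys' then 'keys not yet placed'
theorem A_eq (rows : List (List (String × Int))) (h : ¬ rows = []) :
    select_bus_routes_fields_py rows
      = pvOrdered rows ++ (pvD rows).filter (fun y => !(pvOrdered rows).contains y) := by
  unfold select_bus_routes_fields_py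
  rw [if_neg h]
  rw [foldl_flat]
  simp only [growing_foldl_eq_update, PySem.Set.update_nil_left]
  rw [PySem.Set.update_eq_append_filter, PySem.Set.ofList_ofList]
  simp [pvOrdered, pvD]

theorem B_eq (rows : List (List (String × Int))) :
    select_bus_routes_fields_py_alt rows = PySem.List.sorted (pvD rows) (pvK rows) false := by
  unfold select_bus_routes_fields_py_alt
  simp only [PySem.List.dedup_eq_ofList]
  rfl

-- nodup list: positions strictly increase along the list
theorem pairwise_idxOf (xs : List String) (h : xs.Nodup) :
    xs.Pairwise (fun a b => xs.idxOf a < xs.idxOf b) := by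
  rw [List.pairwise_iff_getElem]
  intro i j hi hj hij
  rw [h.idxOf_getElem i hi, h.idxOf_getElem j hj]; exact hij

theorem K_of_pref (rows : List (List (String × Int))) (k : String) (hk : k ∈ preferredOrder) :
    pvK rows k = (preferredOrder.idxOf k : Int) := by
  unfold pvK
  rw [idxDict_getD _ pref_nodup, if_pos hk]

theorem K_of_rest (rows : List (List (String × Int))) (k : String)
    (hkD : k ∈ pvD rows) (hkP : k ∉ preferredOrder) :
    pvK rows k = (preferredOrder.length : Int) + ((pvD rows).idxOf k : Int) := by
  have hnd : (pvD rows).Nodup := PySem.Set.nodup_ofList _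
  unfold pvK
  rw [idxDict_getD _ pref_nodup, if_neg hkP, idxDict_getD _ hnd, if_pos hkD]

theorem mem_ordered_iff (rows : List (List (String × Int))) (k : String) :
    k ∈ pvOrdered rows ↔ k ∈ preferredOrder ∧ k ∈ pvD rows := by
  simp [pvOrdered, List.mem_filter]

theorem main_sorted (rows : List (List (String × Int))) :
    PySem.List.sorted (pvD rows) (pvK rows) false
      = pvOrdered rows ++ (pvD rows).filter (fun y => !(pvOrdered rows).contains y) := by
  have hDnd : (pvD rows).Nodup := PySem.Set.nodup_ofList _
  have hmem2 : ∀ y, y ∈ (pvD rows).filter (fun y => !(pvOrdered rows).contains y) →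
      y ∈ pvD rows ∧ y ∉ preferredOrder := by
    intro y hy
    rw [List.mem_filter] at hy
    obtain ⟨hyD, hyc⟩ := hy
    refine ⟨hyD, fun hyP => ?_⟩
    have : y ∈ pvOrdered rows := (mem_ordered_iff rows y).mpr ⟨hyP, hyD⟩
    simp [this] at hyc
  -- the filter against 'ordered' is the filter against 'preferred'
  have hfilter : (pvD rows).filter (fun y => !(pvOrdered rows).contains y)
      = (pvD rows).filter (fun y => !preferredOrder.contains y) := by
    apply List.filter_congr
    intro y hyD
    have : (pvOrdered rows).contains y = preferredOrder.contains y := by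
      by_cases hyP : y ∈ preferredOrder
      · have : y ∈ pvOrdered rows := (mem_ordered_iff rows y).mpr ⟨hyP, hyD⟩
        simp [this, hyP]
      · have : y ∉ pvOrdered rows := fun hc => hyP ((mem_ordered_iff rows y).mp hc).1
        simp [this, hyP]
    rw [this]
  -- permutation with the distinct key list
  have hperm1 : List.Perm (pvOrdered rows) ((pvD rows).filter (fun y => preferredOrder.contains y)) := by
    refine (List.perm_ext_iff_of_nodup (pref_nodup.filter _) (hDnd.filter _)).mpr ?_
    intro a
    simp [List.mem_filter, and_comm]
  have hperm : List.Perm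
      (pvOrdered rows ++ (pvD rows).filter (fun y => !(pvOrdered rows).contains y)) (pvD rows) := by
    rw [hfilter]
    exact (hperm1.append (List.Perm.refl _)).trans (List.filter_append_perm _ _)
  -- keys strictly increase along A's output
  have hpw : (pvOrdered rows ++ (pvD rows).filter (fun y => !(pvOrdered rows).contains y)).Pairwise
      (fun a b => pvK rows a < pvK rows b) := by
    rw [List.pairwise_append]
    refine ⟨?_, ?_, ?_⟩
    · refine ((pairwise_idxOf _ pref_nodup).filter _).imp_of_mem ?_
      intro a b ha hb hab
      rw [K_of_pref rows a (List.mem_of_mem_filter ha),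
          K_of_pref rows b (List.mem_of_mem_filter hb)]
      exact_mod_cast hab
    · refine ((pairwise_idxOf _ hDnd).filter _).imp_of_mem ?_
      intro a b ha hb hab
      obtain ⟨haD, haP⟩ := hmem2 a ha
      obtain ⟨hbD, hbP⟩ := hmem2 b hb
      rw [K_of_rest rows a haD haP, K_of_rest rows b hbD hbP]
      omega
    · intro a ha b hb
      have haP := ((mem_ordered_iff rows a).mp ha).1
      obtain ⟨hbD, hbP⟩ := hmem2 b hb
      rw [K_of_pref rows a haP, K_of_rest rows b hbD hbP]
      have h1 : preferredOrder.idxOf a < preferredOrder.length := List.idxOf_lt_length_of_mem haP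
      have h2 : (0 : Int) ≤ ((pvD rows).idxOf b : Int) := Int.natCast_nonneg _
      omega
  exact PySem.List.sorted_eq_of_perm_of_pairwise_lt _ _ _ hperm hpw

-- ===== VERDICT (by name: the statement is the Claim_ definition above) =====
theorem select_bus_routes_fields_py_spec : Claim_equal_select_bus_routes_fields_py := by
  intro rows _
  unfold Spec_select_bus_routes_fields_py
  by_cases h : rows = []
  · subst h; rfl
  · rw [A_eq rows h, B_eq rows, main_sorted rows]
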